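-- pv_equiv track=rewrite | github.com/ghulamfatima123/coding-challenges | General-Programming-and-Algorithms/replacingcharacterinstring.py | solution
-- ===== SOURCE A (Python) =====
-- def solution(s):
--     # TODO: Implement the solution here
--     newstring = ''
--     for i in s:
--         if 'a' <= i <= 'z' or 'A' <= i <= 'Z':
--             if i == 'z':
--                 newstring += 'a'
--             elif i == 'Z':
--                 newstring += 'A'
--             else:
--                 new_letter = ord(i) + 1
--                 newstring += chr(new_letter)
--         else:
--             newstring += i
--     return newstring
-- ===== SOURCE B (Python) =====
-- _LOWER = 'abcdefghijklmnopqrstuvwxyz'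
-- _UPPER = 'ABCDEFGHIJKLMNOPQRSTUVWXYZ'
-- _ALPHA = _LOWER + _UPPER
-- _SUCC = _LOWER[1:] + _LOWER[0] + _UPPER[1:] + _UPPER[0]
--
-- def solution(s):
--     # Inverted traversal: instead of deciding per character, loop over the 52
--     # letters and, for each, scan s for all its occurrence positions (str.find)
--     # writing the successor letter into an output array; other positions keep
--     # their original character. Letter positions are disjoint, so order of the
--     # 52 passes does not matter.
--     out = list(s)
--     for k in range(52):
--         letter = _ALPHA[k]
--         repl = _SUCC[k]
--         i = s.find(letter)
--         while i != -1:
--             out[i] = repl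
--             i = s.find(letter, i + 1)
--     return ''.join(out)
-- ===== Notes on version B (the rewrite author's own statement) =====
-- stated objective: alternative
-- what changed: Inverts the loop structure: instead of one pass branching per character, B loops over the 52 letters and for each scans the string for all its occurrence positions (str.find), writing the successor letter into an output array; untouched positions keep the original character.
import Mathlib
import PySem

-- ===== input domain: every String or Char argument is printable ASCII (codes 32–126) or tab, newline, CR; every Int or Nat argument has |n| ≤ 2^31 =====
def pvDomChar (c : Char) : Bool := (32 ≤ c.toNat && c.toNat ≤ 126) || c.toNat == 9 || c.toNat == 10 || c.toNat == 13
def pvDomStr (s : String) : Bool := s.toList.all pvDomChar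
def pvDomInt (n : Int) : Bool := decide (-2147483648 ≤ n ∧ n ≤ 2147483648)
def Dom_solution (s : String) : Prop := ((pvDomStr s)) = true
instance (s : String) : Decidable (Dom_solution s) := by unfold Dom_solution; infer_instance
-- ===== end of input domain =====

-- B inverts the traversal: it loops over the 52 letters and, for each, scans s for its
-- occurrence positions, writing the successor letter into an output array (alternative
-- decomposition, same cost class).

-- ===== PORT A =====
-- one loop iteration of A: append the (possibly shifted) character to the accumulator
def pvStepA (acc : String) (c : Char) : String :=
  if ('a' ≤ c ∧ c ≤ 'z') ∨ ('A' ≤ c ∧ c ≤ 'Z') then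
    if c = 'z' then acc ++ "a"
    else if c = 'Z' then acc ++ "A"
    else acc ++ String.ofList [Char.ofNat (c.toNat + 1)]   -- chr(ord(i) + 1)
  else acc ++ String.ofList [c]

def solution (s : String) : String :=
  s.toList.foldl pvStepA ""

-- ===== PORT B =====
def pvAlpha : List Char := "abcdefghijklmnopqrstuvwxyzABCDEFGHIJKLMNOPQRSTUVWXYZ".toList
def pvSucc : List Char := "bcdefghijklmnopqrstuvwxyzaBCDEFGHIJKLMNOPQRSTUVWXYZA".toList

-- s.find(c, k) for a SINGLE character c and a nonnegative start k — the only way B calls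
-- str.find: the least index j ≥ k with s[j] = c, else -1 (exact on that calling pattern).
def pvFind (s : List Char) (c : Char) (k : Nat) : Int :=
  if h : k < s.length then (if s[k] = c then (k : Int) else pvFind s c (k + 1)) else -1
termination_by s.length - k

theorem pvFind_ge (s : List Char) (c : Char) (k : Nat) (h : pvFind s c k ≠ -1) :
    (k : Int) ≤ pvFind s c k ∧ pvFind s c k < s.length := by
  induction k using pvFind.induct (s := s) (c := c) with
  | case1 k hk heq => rw [pvFind]; simp [hk, heq]
  | case2 k hk heq ih =>
    rw [pvFind] at h ⊢
    rw [dif_pos hk, if_neg heq] at h ⊢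
    have := ih h
    omega
  | case3 k hk => rw [pvFind] at h; simp [hk] at h

-- B's inner while loop: out[j] = repl at each occurrence of letter from start k on
def pvInner (s : List Char) (letter repl : Char) (out : List Char) (k : Nat) : List Char :=
  let j := pvFind s letter k
  if hj : j = -1 then out
  else pvInner s letter repl (out.set j.toNat repl) (j.toNat + 1)
termination_by s.length + 1 - k
decreasing_by
  have := pvFind_ge s letter k hj
  omega

def solution_alt (s : String) : String :=
  String.ofList ((pvAlpha.zip pvSucc).foldl
    (fun out p => pvInner s.toList p.1 p.2 out 0) s.toList)

-- ===== PRECONDITION & SPEC =====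
def Spec_solution (s : String) (out : String) : Prop := out = solution_alt s
instance (s : String) (out : String) : Decidable (Spec_solution s out) := by unfold Spec_solution; infer_instance

-- ===== CLAIM (what is proved, stated in full; the proofs are below) =====
def Claim_equal_solution : Prop := ∀ (s : String), Dom_solution s → Spec_solution s (solution s)

-- ===== LEMMAS AND PROOFS =====
-- A's step always appends exactly one character
def pvCharA (c : Char) : Char :=
  if ('a' ≤ c ∧ c ≤ 'z') ∨ ('A' ≤ c ∧ c ≤ 'Z') then
    if c = 'z' then 'a'
    else if c = 'Z' then 'A'
    else Char.ofNat (c.toNat + 1)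
  else c

theorem pvStepA_eq (acc : String) (c : Char) : pvStepA acc c = acc ++ String.ofList [pvCharA c] := by
  unfold pvStepA pvCharA
  split_ifs <;> rfl

theorem foldl_stepA (l : List Char) (acc : String) :
    l.foldl pvStepA acc = acc ++ String.ofList (l.map pvCharA) := by
  induction l generalizing acc with
  | nil => simp
  | cons x xs ih =>
    simp only [List.foldl_cons, List.map_cons]
    rw [pvStepA_eq, ih]
    rw [String.append_assoc, ← String.ofList_append]
    rfl

-- what one 52-pass run does to the character at a fixed position
def pvApply (c : Char) : Char :=
  (pvAlpha.zip pvSucc).foldl (fun x p => if c = p.1 then p.2 else x) c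

theorem pvFind_spec (s : List Char) (c : Char) (k : Nat) (j : Nat) (hjk : k ≤ j)
    (hj : j < s.length) (hc : s[j] = c) :
    pvFind s c k ≠ -1 ∧ (pvFind s c k).toNat ≤ j := by
  induction k using pvFind.induct (s := s) (c := c) with
  | case1 k hk heq =>
    rw [pvFind]; rw [dif_pos hk, if_pos heq]
    constructor
    · intro hfalse; omega
    · omega
  | case2 k hk heq ih =>
    rw [pvFind]; rw [dif_pos hk, if_neg heq]
    have hkj : k ≠ j := by rintro rfl; exact heq hc
    exact ih (by omega)
  | case3 k hk => omega
theorem pvFind_at (s : List Char) (c : Char) (k : Nat) (h : pvFind s c k ≠ -1) :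
    s[(pvFind s c k).toNat]? = some c := by
  induction k using pvFind.induct (s := s) (c := c) with
  | case1 k hk heq =>
    rw [pvFind]; rw [dif_pos hk, if_pos heq]
    simp [List.getElem?_eq_getElem hk, heq]
  | case2 k hk heq ih =>
    rw [pvFind] at h ⊢
    rw [dif_pos hk, if_neg heq] at h ⊢
    exact ih h
  | case3 k hk => rw [pvFind] at h; simp [hk] at h

theorem pvInner_length (s : List Char) (letter repl : Char) (out : List Char) (k : Nat) :
    (pvInner s letter repl out k).length = out.length := by
  induction out, k using pvInner.induct (s := s) (letter := letter) (repl := repl) with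
  | case1 out k j hj =>
    have hj' : pvFind s letter k = -1 := hj
    rw [pvInner]; simp [hj']
  | case2 out k j hj ih =>
    have hj' : ¬ pvFind s letter k = -1 := hj
    rw [pvInner]; simp only [hj', dif_neg, not_false_iff]
    simpa using ih

theorem pvInner_get? (s : List Char) (letter repl : Char) (out : List Char) (k : Nat)
    (hl : out.length = s.length) (i : Nat) (hi : i < s.length) :
    (pvInner s letter repl out k)[i]? =
      if k ≤ i ∧ s[i] = letter then some repl else out[i]? := by
  induction out, k using pvInner.induct (s := s) (letter := letter) (repl := repl) with
  | case1 out k j hj =>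
    have hj' : pvFind s letter k = -1 := hj
    rw [pvInner]
    simp only [hj', dif_pos]
    split_ifs with hcase
    · exact absurd hj' (pvFind_spec s letter k i hcase.1 hi hcase.2).1
    · rfl
  | case2 out k j hj ih =>
    have hj' : ¬ pvFind s letter k = -1 := hj
    rw [pvInner]
    simp only [hj', dif_neg, not_false_iff]
    have hge : (k : Int) ≤ j ∧ j < s.length := pvFind_ge s letter k hj'
    have hjN : j.toNat < s.length := by omega
    have hat : s[j.toNat] = letter := by
      have h0 : s[j.toNat]? = some letter := pvFind_at s letter k hj'
      rw [List.getElem?_eq_getElem hjN] at h0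
      exact Option.some.inj h0
    rw [ih (by simpa using hl)]
    by_cases h1 : j.toNat + 1 ≤ i ∧ s[i] = letter
    · simp [h1, show k ≤ i ∧ s[i] = letter from ⟨by omega, h1.2⟩]
    · simp only [h1, if_neg, not_false_iff]
      by_cases h2 : k ≤ i ∧ s[i] = letter
      · have hmin : pvFind s letter k ≠ -1 ∧ (pvFind s letter k).toNat ≤ i :=
          pvFind_spec s letter k i h2.1 hi h2.2
        have hminj : j.toNat ≤ i := hmin.2
        have hlt3 : ¬ (j.toNat + 1 ≤ i) := fun hle => h1 ⟨hle, h2.2⟩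
        have hij : i = j.toNat := by omega
        have hlt2 : j.toNat < out.length := by omega
        subst hij
        simp [hlt2, h2]
      · simp only [h2, if_neg, not_false_iff]
        have hne : j.toNat ≠ i := by
          intro h; exact h2 ⟨by omega, h ▸ hat⟩
        simp [hne]

theorem foldl_inner_get? (ps : List (Char × Char)) (s : List Char) (acc : List Char)
    (hl : acc.length = s.length) (i : Nat) (hi : i < s.length) :
    (ps.foldl (fun out p => pvInner s p.1 p.2 out 0) acc)[i]? =
      (acc[i]?.map (fun c0 => ps.foldl (fun x p => if s[i] = p.1 then p.2 else x) c0)) := by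
  induction ps generalizing acc with
  | nil =>
    simp
  | cons p ps ih =>
    simp only [List.foldl_cons]
    rw [ih _ (by rw [pvInner_length]; exact hl)]
    rw [pvInner_get? s p.1 p.2 acc 0 hl i hi]
    have hsome : acc[i]? = some (acc[i]'(hl ▸ hi)) := List.getElem?_eq_getElem _
    by_cases hc : s[i] = p.1
    · simp [hsome, hc]
    · simp [hsome, hc]

theorem foldl_inner_length (ps : List (Char × Char)) (s : List Char) (acc : List Char) :
    (ps.foldl (fun out p => pvInner s p.1 p.2 out 0) acc).length = acc.length := by
  induction ps generalizing acc with
  | nil => rfl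
  | cons p ps ih => simp only [List.foldl_cons]; rw [ih, pvInner_length]

theorem pvCharA_eq_apply (c : Char) (h : pvDomChar c = true) : pvCharA c = pvApply c := by
  have key : ∀ n : Nat, n < 127 → pvCharA (Char.ofNat n) = pvApply (Char.ofNat n) := by
    set_option maxRecDepth 8000 in decide
  have hv : c.toNat < 127 := by
    simp only [pvDomChar, Bool.or_eq_true, Bool.and_eq_true, decide_eq_true_eq, beq_iff_eq] at h
    omega
  simpa [Char.ofNat_toNat] using key c.toNat hv

theorem alt_list_eq (s : String) (hd : pvDomStr s = true) :
    ((pvAlpha.zip pvSucc).foldl (fun out p => pvInner s.toList p.1 p.2 out 0) s.toList) =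
      s.toList.map pvCharA := by
  apply List.ext_getElem?
  intro i
  by_cases hi : i < s.toList.length
  · rw [foldl_inner_get? _ _ _ rfl i hi]
    have hsome : s.toList[i]? = some (s.toList[i]'hi) := List.getElem?_eq_getElem _
    rw [hsome]
    have hdc : pvDomChar (s.toList[i]'hi) = true := by
      have := List.all_eq_true.mp hd
      exact this _ (List.getElem_mem hi)
    simp only [Option.map_some, List.getElem?_map, hsome, Option.map_some]
    rw [← pvApply, ← pvCharA_eq_apply _ hdc]
  · have h1 : ((pvAlpha.zip pvSucc).foldl (fun out p => pvInner s.toList p.1 p.2 out 0) s.toList)[i]? = none := by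
      rw [List.getElem?_eq_none]
      rw [foldl_inner_length]; omega
    have h2 : (s.toList.map pvCharA)[i]? = none := by
      rw [List.getElem?_eq_none]; simp only [List.length_map]; omega
    rw [h1, h2]

-- ===== VERDICT (by name: the statement is the Claim_ definition above) =====
theorem solution_spec : Claim_equal_solution := by
  intro s hd
  unfold Spec_solution solution solution_alt
  rw [foldl_stepA, alt_list_eq s hd]
  rfl
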